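-- pv_equiv track=rewrite | github.com/helperfunc/code | leetcode/Design/271. Encode and Decode Strings/solutions.py | encode_len_str
-- ===== SOURCE A (Python) =====
-- def encode_len_str(s):
--     l = len(s) # 32-bit integer, 4 bytes, 8-bit per byte
--     res = []
--     for i in range(4):
--         tmp = (l >> (i * 8) & 0xff)  # right move integer l 0, 8, 16, 24, use 0xff to only save the last 8-bits value of 1
--         res.append(chr(tmp)) #and use unicode to represent the 8-bits
--     res.reverse()
--     return ''.join(res)
-- ===== SOURCE B (Python) =====
-- import struct
--
-- def encode_len_str(s):
--     # closed-form pack: 4 big-endian bytes of len(s) mod 2^32, as latin-1 chars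
--     return struct.pack('>I', len(s) & 0xFFFFFFFF).decode('latin-1')
-- ===== Notes on version B (the rewrite author's own statement) =====
-- stated objective: idiomatic
-- what changed: Replaces the 4-iteration shift/mask loop with append/reverse/join by a single closed-form struct.pack big-endian 4-byte pack of the masked length, decoded byte-per-char.
import Mathlib
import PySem

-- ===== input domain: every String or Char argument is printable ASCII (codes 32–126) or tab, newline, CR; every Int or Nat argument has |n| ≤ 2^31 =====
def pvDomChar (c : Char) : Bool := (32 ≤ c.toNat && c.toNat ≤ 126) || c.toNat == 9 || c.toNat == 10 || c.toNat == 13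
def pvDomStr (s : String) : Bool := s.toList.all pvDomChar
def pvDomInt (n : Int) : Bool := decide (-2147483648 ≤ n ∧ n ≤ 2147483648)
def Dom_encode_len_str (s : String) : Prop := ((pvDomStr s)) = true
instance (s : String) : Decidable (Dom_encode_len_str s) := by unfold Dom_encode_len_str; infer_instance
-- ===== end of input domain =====

-- B replaces A's per-byte shift/mask loop with the closed-form struct.pack('>I', len & 0xFFFFFFFF)
-- big-endian pack (objective: idiomatic).

-- ===== PORT A =====
-- len(s) is nonnegative, so carried as Nat (exact); chr(tmp) with tmp < 256 → Char.ofNat.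
def encode_len_str (s : String) : String :=
  let l : Nat := s.toList.length
  let res : List Char :=
    (PySem.List.pyRange 0 4 1).foldl
      (fun r i => r ++ [Char.ofNat ((l >>> (i.toNat * 8)) &&& 0xff)]) []
  String.mk res.reverse

-- ===== PORT B =====
-- struct.pack('>I', n) yields the four big-endian bytes of n (n < 2^32 after the mask);
-- .decode('latin-1') maps each byte b to chr(b). Exact byte-for-byte port.
def encode_len_str_alt (s : String) : String :=
  let n : Nat := s.toList.length &&& 0xFFFFFFFF
  String.mk [Char.ofNat ((n >>> 24) &&& 0xff), Char.ofNat ((n >>> 16) &&& 0xff),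
             Char.ofNat ((n >>> 8) &&& 0xff), Char.ofNat (n &&& 0xff)]

-- ===== PRECONDITION & SPEC =====
def Spec_encode_len_str (s : String) (out : String) : Prop := out = encode_len_str_alt s
instance (s : String) (out : String) : Decidable (Spec_encode_len_str s out) := by unfold Spec_encode_len_str; infer_instance

-- ===== CLAIM (what is proved, stated in full; the proofs are below) =====
def Claim_equal_encode_len_str : Prop := ∀ (s : String), Dom_encode_len_str s → Spec_encode_len_str s (encode_len_str s)

-- ===== LEMMAS AND PROOFS =====
lemma pv_bytes (l : Nat) :
    ((l >>> 0) &&& 255 = ((l &&& 4294967295) &&& 255)) ∧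
    ((l >>> 8) &&& 255 = (((l &&& 4294967295) >>> 8) &&& 255)) ∧
    ((l >>> 16) &&& 255 = (((l &&& 4294967295) >>> 16) &&& 255)) ∧
    ((l >>> 24) &&& 255 = (((l &&& 4294967295) >>> 24) &&& 255)) := by
  have h255 : (255 : Nat) = 2 ^ 8 - 1 := by norm_num
  have hm : (4294967295 : Nat) = 2 ^ 32 - 1 := by norm_num
  simp only [Nat.shiftRight_eq_div_pow, h255, hm, Nat.and_two_pow_sub_one_eq_mod]
  omega

-- ===== VERDICT (by name: the statement is the Claim_ definition above) =====
theorem encode_len_str_spec : Claim_equal_encode_len_str := by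
  intro s _
  unfold Spec_encode_len_str encode_len_str encode_len_str_alt
  obtain ⟨h0, h8, h16, h24⟩ := pv_bytes s.toList.length
  have hl : s.toList.length = s.length := by simp
  rw [hl] at h0 h8 h16 h24
  simp only [Nat.shiftRight_zero] at h0
  simp [PySem.List.pyRange, List.range_succ]
  norm_num [h8, h16, h24]
  rw [h0]
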